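-- pv_equiv track=rewrite | github.com/hj2687787246/ai-coding-commander | legacy/agent-runtime/commander/graph/policies/role_guard.py | _normalize_repo_path
-- ===== SOURCE A (Python) =====
-- def _normalize_repo_path(value: object) -> str | None:
--     if not isinstance(value, str):
--         return None
--     normalized = value.strip()
--     if normalized.startswith('"') and normalized.endswith('"') and len(normalized) >= 2:
--         normalized = normalized[1:-1]
--     normalized = normalized.replace("\\", "/")
--     while normalized.startswith("./"):
--         normalized = normalized[2:]
--     while "//" in normalized:
--         normalized = normalized.replace("//", "/")
--     normalized = normalized.strip("/")
--     return normalized or None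
-- ===== SOURCE B (Python) =====
-- def _normalize_repo_path(value):
--     if not isinstance(value, str):
--         return None
--     s = value.strip()
--     if len(s) >= 2 and s.startswith('"') and s.endswith('"'):
--         s = s[1:-1]
--     parts = s.replace("\\", "/").split("/")
--     i = 0
--     while i + 1 < len(parts) and parts[i] == ".":
--         i += 1
--     out = "/".join(p for p in parts[i:] if p)
--     return out if out else None
-- ===== Notes on version B (the rewrite author's own statement) =====
-- stated objective: simpler
-- what changed: A's repeated whole-string double-slash replace loop plus final slash strip (and its string-level dot-slash prefix loop) are replaced by splitting the path once on the separator, skipping leading single-dot segments by index, and joining the nonempty segments in one pass.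
import Mathlib
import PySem

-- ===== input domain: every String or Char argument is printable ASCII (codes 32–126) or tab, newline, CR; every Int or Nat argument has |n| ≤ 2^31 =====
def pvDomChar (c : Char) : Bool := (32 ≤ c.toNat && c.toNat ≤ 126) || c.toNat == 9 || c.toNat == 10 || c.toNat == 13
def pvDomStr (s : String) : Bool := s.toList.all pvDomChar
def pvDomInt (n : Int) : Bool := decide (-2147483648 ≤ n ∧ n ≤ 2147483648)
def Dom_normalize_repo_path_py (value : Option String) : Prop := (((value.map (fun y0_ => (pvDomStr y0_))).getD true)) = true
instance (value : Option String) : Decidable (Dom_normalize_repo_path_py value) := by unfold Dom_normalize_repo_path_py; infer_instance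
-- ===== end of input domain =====

-- B replaces A's repeated whole-string '//'-replace loop plus final strip('/') by one
-- split-on-'/' / filter-empty / join pass over the segment list (the './' prefix loop is read
-- off that same segment list); objective: simpler one-pass segment form, same return value.

-- ===== PORT A =====
-- pvRepSlash mirrors ONE pass of Python's s.replace("//", "/"); it exists only to justify
-- termination of the '//' while-loop below (the port itself calls PySem.Chars.replace).
def pvRepSlash : List Char → List Char
  | [] => []
  | [c] => [c]
  | a :: b :: t => if a = '/' ∧ b = '/' then '/' :: pvRepSlash t else a :: pvRepSlash (b :: t)

theorem pvRepSlash_length_le (cs : List Char) : (pvRepSlash cs).length ≤ cs.length := by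
  fun_induction pvRepSlash cs <;> simp_all <;> omega

theorem pvRepSlash_length_lt (cs : List Char) (h : ['/', '/'] <:+: cs) :
    (pvRepSlash cs).length < cs.length := by
  fun_induction pvRepSlash cs with
  | case1 => simp at h
  | case2 c =>
    rcases h with ⟨s, t, hst⟩
    have := congrArg List.length hst; simp at this; omega
  | case3 a b t hab ih =>
    have hle := pvRepSlash_length_le t
    simp; omega
  | case4 a b t hab ih =>
    rw [List.infix_cons_iff] at h
    rcases h with h | h
    · rcases h with ⟨t', ht'⟩
      simp at ht'
      exact absurd ⟨ht'.1.symm, ht'.2.1.symm⟩ hab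
    · have := ih h
      simp only [List.length_cons] at this ⊢
      omega

theorem pvReplace_go_spec (fuel : Nat) : ∀ (l acc : List Char), l.length ≤ fuel →
    PySem.Chars.replace.go ['/', '/'] ['/'] fuel l acc = acc.reverse ++ pvRepSlash l := by
  induction fuel with
  | zero =>
    intro l acc h
    have : l = [] := by cases l <;> simp_all
    subst this
    rw [PySem.Chars.replace.go]
    simp [pvRepSlash]
  | succ fuel ih =>
    intro l acc h
    match l with
    | [] =>
      rw [PySem.Chars.replace.go]
      simp [pvRepSlash]
      all_goals omega
    | [c] =>
      rw [PySem.Chars.replace.go]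
      have hp : List.isPrefixOf ['/', '/'] [c] = false := by simp [List.isPrefixOf]
      simp only [hp, Bool.false_eq_true, if_false]
      rw [ih [] (c :: acc) (by simp)]
      simp [pvRepSlash]
    | a :: b :: t =>
      rw [PySem.Chars.replace.go]
      by_cases hab : a = '/' ∧ b = '/'
      · obtain ⟨ha, hb⟩ := hab; subst ha; subst hb
        have hp : List.isPrefixOf ['/', '/'] ('/' :: '/' :: t) = true := by
          simp [List.isPrefixOf]
        simp only [hp, if_pos]
        have e1 : List.drop (['/', '/'] : List Char).length ('/' :: '/' :: t) = t := rfl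
        have e2 : (['/'] : List Char).reverse ++ acc = '/' :: acc := rfl
        rw [e1, e2]
        rw [ih t ('/' :: acc) (by simp at h ⊢; omega)]
        simp [pvRepSlash]
      · have hp : List.isPrefixOf ['/', '/'] (a :: b :: t) = false := by
          simp [List.isPrefixOf]
          intro h1 h2; exact hab ⟨h1.symm, h2.symm⟩
        simp only [hp, Bool.false_eq_true, if_false]
        rw [ih (b :: t) (a :: acc) (by simp at h ⊢; omega)]
        simp [pvRepSlash, hab]

theorem pvReplace_eq_repSlash (cs : List Char) :
    PySem.Chars.replace cs ['/', '/'] ['/'] = pvRepSlash cs := by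
  rw [PySem.Chars.replace]
  simp only [List.isEmpty_cons, Bool.false_eq_true, if_false]
  rw [pvReplace_go_spec cs.length cs [] le_rfl]
  simp

-- while normalized.startswith("./"): normalized = normalized[2:]
def pvLoopDot (cs : List Char) : List Char :=
  if h : PySem.Chars.startswith cs ['.', '/'] then
    pvLoopDot (PySem.List.slice cs (some 2) none)
  else cs
termination_by cs.length
decreasing_by
  rcases (PySem.Chars.startswith_iff cs ['.', '/']).mp h with ⟨t, ht⟩
  rw [PySem.List.slice_from cs (by norm_num : (0:Int) ≤ 2)]
  subst ht; simp

-- while "//" in normalized: normalized = normalized.replace("//", "/")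
def pvLoopSlash (cs : List Char) : List Char :=
  if h : PySem.Chars.isIn ['/', '/'] cs then
    pvLoopSlash (PySem.Chars.replace cs ['/', '/'] ['/'])
  else cs
termination_by cs.length
decreasing_by
  rw [pvReplace_eq_repSlash]
  exact pvRepSlash_length_lt cs ((PySem.Chars.isIn_iff_infix _ _).mp h)

def normalize_repo_path_py (value : Option String) : Option String :=
  match value with
  | none => none
  | some v =>
    let n0 := PySem.Chars.strip v.toList
    let n1 :=
      if PySem.Chars.startswith n0 ['"'] && PySem.Chars.endswith n0 ['"']
          && decide (2 ≤ PySem.Chars.len n0) then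
        PySem.List.slice n0 (some 1) (some (-1))
      else n0
    let n2 := PySem.Chars.replace n1 ['\\'] ['/']
    let n3 := pvLoopDot n2
    let n4 := pvLoopSlash n3
    let n5 := PySem.Chars.stripChars n4 ['/']
    if n5.isEmpty then none else some (String.ofList n5)

-- ===== PORT B =====
-- i = 0; while i + 1 < len(parts) and parts[i] == ".": i += 1
def pvDotSkip (parts : List (List Char)) (i : Nat) : Nat :=
  if i + 1 < parts.length ∧ PySem.List.pyGet? parts (Int.ofNat i) = some ['.'] then
    pvDotSkip parts (i + 1)
  else i
termination_by parts.length - i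

def normalize_repo_path_py_alt (value : Option String) : Option String :=
  match value with
  | none => none
  | some v =>
    let s0 := PySem.Chars.strip v.toList
    let s1 :=
      if decide (2 ≤ PySem.Chars.len s0) && PySem.Chars.startswith s0 ['"']
          && PySem.Chars.endswith s0 ['"'] then
        PySem.List.slice s0 (some 1) (some (-1))
      else s0
    let parts := PySem.Chars.splitOn (PySem.Chars.replace s1 ['\\'] ['/']) ['/']
    let i := pvDotSkip parts 0
    let out := PySem.Chars.join ['/']
      ((PySem.List.slice parts (some (Int.ofNat i)) none).filter (fun p => !p.isEmpty))
    if out.isEmpty then none else some (String.ofList out)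

-- ===== PRECONDITION & SPEC =====
def Spec_normalize_repo_path_py (value : Option String) (out : Option String) : Prop := out = normalize_repo_path_py_alt value
instance (value : Option String) (out : Option String) : Decidable (Spec_normalize_repo_path_py value out) := by unfold Spec_normalize_repo_path_py; infer_instance

-- ===== CLAIM (what is proved, stated in full; the proofs are below) =====
def Claim_equal_normalize_repo_path_py : Prop := ∀ (value : Option String), Dom_normalize_repo_path_py value → Spec_normalize_repo_path_py value (normalize_repo_path_py value)

-- ===== LEMMAS AND PROOFS =====

-- prepend a to the first segment
def pvConsHead (a : List Char) : List (List Char) → List (List Char)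
  | [] => [a]
  | s :: r => (a ++ s) :: r

-- the list of '/'-separated segments of cs (structural model of cs.split("/"))
def pvSegs : List Char → List (List Char)
  | [] => [[]]
  | c :: t => if c = '/' then [] :: pvSegs t else pvConsHead [c] (pvSegs t)

theorem pvSegs_ne_nil (cs : List Char) : pvSegs cs ≠ [] := by
  cases cs with
  | nil => simp [pvSegs]
  | cons c t =>
    simp only [pvSegs]; split
    · simp
    · cases h : pvSegs t <;> simp [pvConsHead]

theorem pvConsHead_nil (P : List (List Char)) (h : P ≠ []) : pvConsHead [] P = P := by
  cases P <;> simp_all [pvConsHead]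

theorem pvConsHead_consHead (a b : List Char) (P : List (List Char)) :
    pvConsHead a (pvConsHead b P) = pvConsHead (a ++ b) P := by
  cases P <;> simp [pvConsHead]

theorem pvSegs_append (seg ds : List Char) (h : ∀ c ∈ seg, c ≠ '/') :
    pvSegs (seg ++ ds) = pvConsHead seg (pvSegs ds) := by
  induction seg with
  | nil => simp [pvConsHead_nil _ (pvSegs_ne_nil ds)]
  | cons c s ih =>
    have hc : c ≠ '/' := h c (by simp)
    simp only [List.cons_append, pvSegs, if_neg hc]
    rw [ih (fun x hx => h x (by simp [hx]))]
    rw [pvConsHead_consHead]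
    rfl

theorem pvSplitOn_go_spec (fuel : Nat) :
    ∀ (l cur : List Char) (acc : List (List Char)), l.length < fuel →
    PySem.Chars.splitOn.go ['/'] fuel l cur acc
      = acc.reverse ++ pvConsHead cur.reverse (pvSegs l) := by
  induction fuel with
  | zero => intro l cur acc h; omega
  | succ fuel ih =>
    intro l cur acc h
    match l with
    | [] =>
      rw [PySem.Chars.splitOn.go]
      simp [pvSegs, pvConsHead]
      all_goals omega
    | c :: rest =>
      rw [PySem.Chars.splitOn.go]
      by_cases hc : c = '/'
      · subst hc
        have hp : List.isPrefixOf ['/'] ('/' :: rest) = true := by simp [List.isPrefixOf]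
        simp only [hp, if_pos]
        have e1 : List.drop (['/'] : List Char).length ('/' :: rest) = rest := rfl
        rw [e1, ih rest [] (cur.reverse :: acc) (by simp at h ⊢; omega)]
        have e2 : ([] : List Char).reverse = [] := rfl
        rw [e2, pvConsHead_nil _ (pvSegs_ne_nil rest)]
        simp only [pvSegs, List.reverse_cons]
        cases hq : pvSegs rest <;> simp [pvConsHead]
      · have hp : List.isPrefixOf ['/'] (c :: rest) = false := by
          simp [List.isPrefixOf]; exact fun e => hc e.symm
        simp only [hp, Bool.false_eq_true, if_false]
        rw [ih rest (c :: cur) acc (by simp at h ⊢; omega)]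
        simp only [pvSegs, if_neg hc, List.reverse_cons]
        rw [pvConsHead_consHead]

theorem pvSplitOn_eq_segs (ds : List Char) : PySem.Chars.splitOn ds ['/'] = pvSegs ds := by
  rw [PySem.Chars.splitOn]
  rw [pvSplitOn_go_spec (ds.length + 1) ds [] [] (by omega)]
  simp [pvConsHead_nil _ (pvSegs_ne_nil ds)]

-- one replace pass preserves the nonempty segments
theorem pvRepSlash_filter (cs : List Char) :
    ∀ a, (pvConsHead a (pvSegs (pvRepSlash cs))).filter (fun p => !p.isEmpty)
      = (pvConsHead a (pvSegs cs)).filter (fun p => !p.isEmpty) := by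
  fun_induction pvRepSlash cs with
  | case1 => intro a; rfl
  | case2 c => intro a; rfl
  | case3 a' b t hab ih =>
    obtain ⟨ha, hb⟩ := hab; subst ha; subst hb
    intro a
    have h1 : pvSegs ('/' :: pvRepSlash t) = [] :: pvSegs (pvRepSlash t) := by
      simp [pvSegs]
    have h2 : pvSegs ('/' :: '/' :: t) = [] :: [] :: pvSegs t := by
      simp [pvSegs]
    rw [h1, h2]
    show ((a ++ []) :: pvSegs (pvRepSlash t)).filter _ = ((a ++ []) :: [] :: pvSegs t).filter _
    simp only [List.append_nil, List.filter_cons]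
    have ihnil := ih []
    rw [pvConsHead_nil _ (pvSegs_ne_nil _), pvConsHead_nil _ (pvSegs_ne_nil _)] at ihnil
    rw [ihnil]
    simp
  | case4 a' b t hab ih =>
    intro a
    by_cases ha' : a' = '/'
    · subst ha'
      have h1 : pvSegs ('/' :: pvRepSlash (b :: t)) = [] :: pvSegs (pvRepSlash (b :: t)) := by
        simp [pvSegs]
      have h2 : pvSegs ('/' :: b :: t) = [] :: pvSegs (b :: t) := by
        simp [pvSegs]
      rw [h1, h2]
      show ((a ++ []) :: pvSegs (pvRepSlash (b :: t))).filter _ = ((a ++ []) :: pvSegs (b :: t)).filter _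
      simp only [List.append_nil, List.filter_cons]
      have ihnil := ih []
      rw [pvConsHead_nil _ (pvSegs_ne_nil _), pvConsHead_nil _ (pvSegs_ne_nil _)] at ihnil
      rw [ihnil]
    · have h1 : pvSegs (a' :: pvRepSlash (b :: t)) = pvConsHead [a'] (pvSegs (pvRepSlash (b :: t))) := by
        simp [pvSegs, ha']
      have h2 : pvSegs (a' :: b :: t) = pvConsHead [a'] (pvSegs (b :: t)) := by
        simp [pvSegs, ha']
      rw [h1, h2, pvConsHead_consHead, pvConsHead_consHead]
      exact ih (a ++ [a'])

theorem pvContains_slash :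
    (fun c => (['/'] : List Char).contains c) = (fun c : Char => decide (c = '/')) := by
  funext c
  by_cases hc : c = '/' <;> simp [List.contains_cons, hc]

theorem pvStripChars_eq (l : List Char) :
    PySem.Chars.stripChars l ['/']
      = (List.dropWhile (fun c : Char => decide (c = '/'))
          (List.dropWhile (fun c : Char => decide (c = '/')) l).reverse).reverse := by
  simp only [PySem.Chars.stripChars, pvContains_slash]

theorem pvDropWhile_all_neg (l : List Char) (h : ∀ x ∈ l, x ≠ '/') :
    l.dropWhile (fun c : Char => decide (c = '/')) = l := by
  cases l with
  | nil => rfl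
  | cons c t =>
    rw [List.dropWhile_cons]
    simp [h c (by simp)]

theorem pvDropNotHead (c : Char) (t : List Char) (hc : c ≠ '/') :
    List.dropWhile (fun c : Char => decide (c = '/')) (c :: t) = c :: t := by
  rw [List.dropWhile_cons]
  simp [hc]

theorem pvJoin_singleton (x : List Char) : PySem.Chars.join ['/'] [x] = x := by
  simp [PySem.Chars.join, List.intercalate]

theorem pvSegs_all_ne (seg : List Char) (h : ∀ x ∈ seg, x ≠ '/') : pvSegs seg = [seg] := by
  have := pvSegs_append seg [] h
  simp only [List.append_nil] at this
  rw [this]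
  simp [pvSegs, pvConsHead]

-- decompose c :: t (c ≠ '/') into a nonempty slash-free first segment and a rest
theorem pvSplitHead : ∀ (t : List Char) (c : Char), c ≠ '/' →
    ∃ seg rest, c :: t = seg ++ rest ∧ seg ≠ [] ∧ (∀ x ∈ seg, x ≠ '/') ∧
      (rest = [] ∨ ∃ t', rest = '/' :: t') := by
  intro t
  induction t with
  | nil =>
    intro c hc
    exact ⟨[c], [], by simp, by simp, by simpa using hc, Or.inl rfl⟩
  | cons d u ih =>
    intro c hc
    by_cases hd : d = '/'
    · subst hd
      exact ⟨[c], '/' :: u, by simp, by simp, by simpa using hc, Or.inr ⟨u, rfl⟩⟩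
    · obtain ⟨seg, rest, h1, h2, h3, h4⟩ := ih d hd
      refine ⟨c :: seg, rest, ?_, by simp, ?_, h4⟩
      · simp [← h1]
      · intro x hx
        rcases List.mem_cons.mp hx with h | h
        · subst h; exact hc
        · exact h3 x h

-- the two-sided strip equals filter+join on segments, when no "//" occurs
theorem pvStrip_no_dbl_aux : ∀ (n : Nat) (ds : List Char), ds.length ≤ n → ¬ (['/', '/'] <:+: ds) →
    PySem.Chars.stripChars ds ['/']
      = PySem.Chars.join ['/'] ((pvSegs ds).filter (fun p => !p.isEmpty)) := by
  intro n
  induction n with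
  | zero =>
    intro ds h _
    have : ds = [] := by cases ds <;> simp_all
    subst this
    simp [PySem.Chars.stripChars, pvSegs, PySem.Chars.join_nil]
  | succ n ih =>
    intro ds hlen hnd
    match ds with
    | [] => simp [PySem.Chars.stripChars, pvSegs, PySem.Chars.join_nil]
    | c :: t =>
      by_cases hc : c = '/'
      · -- leading slash: stripChars drops it, segs produce an empty head segment
        subst hc
        have e1 : PySem.Chars.stripChars ('/' :: t) ['/'] = PySem.Chars.stripChars t ['/'] := by
          rw [pvStripChars_eq, pvStripChars_eq, List.dropWhile_cons]
          simp
        have e2 : pvSegs ('/' :: t) = [] :: pvSegs t := by simp [pvSegs]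
        rw [e1, e2]
        have hnd' : ¬ (['/', '/'] <:+: t) := fun h => hnd (h.trans (List.suffix_cons '/' t).isInfix)
        rw [ih t (by simp at hlen; omega) hnd']
        simp
      · obtain ⟨seg, rest, hds, hsegne, hall, hrest⟩ := pvSplitHead t c hc
        rcases hrest with hrest | ⟨t', hrest⟩
        · -- no slash at all: everything is one nonempty segment
          subst hrest
          rw [List.append_nil] at hds
          rw [hds, pvStripChars_eq]
          rw [pvDropWhile_all_neg seg hall,
              pvDropWhile_all_neg seg.reverse (fun x hx => hall x (List.mem_reverse.mp hx)),
              List.reverse_reverse]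
          rw [pvSegs_all_ne seg hall]
          rw [List.filter_cons, if_pos (by simpa using hsegne), List.filter_nil, pvJoin_singleton]
        · subst hrest
          cases t' with
          | nil =>
            -- ds = seg ++ "/": the trailing slash is stripped / filtered
            rw [pvStripChars_eq, pvDropNotHead c t hc]
            rw [hds]
            have e1 : (seg ++ ['/']).reverse = '/' :: seg.reverse := by simp
            rw [e1, List.dropWhile_cons]
            simp only [decide_true, if_pos]
            rw [pvDropWhile_all_neg seg.reverse (fun x hx => hall x (List.mem_reverse.mp hx)),
                List.reverse_reverse]
            rw [pvSegs_append seg ['/'] hall]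
            have e2 : pvSegs ['/'] = [[], []] := by simp [pvSegs]
            rw [e2]
            simp only [pvConsHead, List.append_nil]
            rw [List.filter_cons, if_pos (by simpa using hsegne)]
            simp
          | cons d u =>
            have hd : d ≠ '/' := by
              intro hd; subst hd
              exact hnd ⟨seg, u, by rw [hds]; simp⟩
            have hnd' : ¬ (['/', '/'] <:+: d :: u) := by
              intro h
              exact hnd (h.trans ⟨seg ++ ['/'], by simp [hds]⟩)
            have hlen' : (d :: u).length ≤ n := by
              have := congrArg List.length hds
              simp at this hlen ⊢
              have hs1 : 1 ≤ seg.length := by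
                cases seg with
                | nil => exact absurd rfl hsegne
                | cons _ _ => simp
              omega
            have hRne : List.dropWhile (fun c : Char => decide (c = '/')) (d :: u).reverse ≠ [] := by
              intro h
              rw [List.dropWhile_eq_nil_iff] at h
              have := h d (by simp)
              simp [hd] at this
            rw [pvStripChars_eq, pvDropNotHead c t hc, hds]
            have e1 : (seg ++ '/' :: d :: u).reverse = (d :: u).reverse ++ '/' :: seg.reverse := by
              simp
            rw [e1, List.dropWhile_append]
            rw [if_neg (by simpa using hRne)]
            rw [List.reverse_append]
            have e3 : ('/' :: seg.reverse).reverse = seg ++ ['/'] := by simp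
            rw [e3]
            have e4 : (List.dropWhile (fun c : Char => decide (c = '/')) (d :: u).reverse).reverse
                = PySem.Chars.stripChars (d :: u) ['/'] := by
              rw [pvStripChars_eq, pvDropNotHead d u hd]
            rw [e4, ih (d :: u) hlen' hnd']
            rw [pvSegs_append seg ('/' :: d :: u) hall]
            have e5 : pvSegs ('/' :: d :: u) = [] :: pvSegs (d :: u) := by simp [pvSegs]
            rw [e5]
            simp only [pvConsHead, List.append_nil]
            rw [List.filter_cons, if_pos (by simpa using hsegne)]
            have hFne : (pvSegs (d :: u)).filter (fun p => !p.isEmpty) ≠ [] := by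
              have e6 : pvSegs (d :: u) = pvConsHead [d] (pvSegs u) := by simp [pvSegs, hd]
              cases hsu : pvSegs u with
              | nil => exact absurd hsu (pvSegs_ne_nil u)
              | cons h0 r =>
                rw [e6, hsu]
                simp [pvConsHead]
            cases hF : (pvSegs (d :: u)).filter (fun p => !p.isEmpty) with
            | nil => exact absurd hF hFne
            | cons f fs =>
              rw [PySem.Chars.join_cons_cons]

-- the '//' while-loop plus strip('/') equals filter+join over the segments
theorem pvLoopSlash_spec (ds : List Char) :
    PySem.Chars.stripChars (pvLoopSlash ds) ['/']
      = PySem.Chars.join ['/'] ((pvSegs ds).filter (fun p => !p.isEmpty)) := by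
  fun_induction pvLoopSlash ds with
  | case1 cs h ih =>
    rw [ih]
    rw [pvReplace_eq_repSlash]
    have := pvRepSlash_filter cs []
    rw [pvConsHead_nil _ (pvSegs_ne_nil _), pvConsHead_nil _ (pvSegs_ne_nil _)] at this
    rw [this]
  | case2 cs h =>
    have hb : PySem.Chars.isIn ['/', '/'] cs = false := by
      cases hx : PySem.Chars.isIn ['/', '/'] cs
      · rfl
      · exact absurd hx h
    exact pvStrip_no_dbl_aux cs.length cs le_rfl ((PySem.Chars.isIn_eq_false_iff _ _).mp hb)

theorem pvPyGet_cons_succ (x : List Char) (Q : List (List Char)) (i : Nat) :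
    PySem.List.pyGet? (x :: Q) (Int.ofNat (i + 1)) = PySem.List.pyGet? Q (Int.ofNat i) := by
  have h1 : PySem.List.pyGet? (x :: Q) (Int.ofNat (i + 1)) = (x :: Q)[i + 1]? := by
    exact_mod_cast PySem.List.pyGet?_natCast (x :: Q) (i + 1)
  have h2 : PySem.List.pyGet? Q (Int.ofNat i) = Q[i]? := by
    exact_mod_cast PySem.List.pyGet?_natCast Q i
  rw [h1, h2]
  simp

theorem pvDotSkip_shift (x : List Char) (Q : List (List Char)) : ∀ (i : Nat),
    pvDotSkip (x :: Q) (i + 1) = pvDotSkip Q i + 1 := by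
  intro i
  fun_induction pvDotSkip Q i with
  | case1 j hj ih =>
    rw [pvDotSkip]
    rw [if_pos ⟨by simp; omega, by rw [pvPyGet_cons_succ]; exact hj.2⟩]
    rw [ih]
  | case2 j hj =>
    rw [pvDotSkip]
    rw [if_neg ?_]
    intro ⟨h1, h2⟩
    apply hj
    refine ⟨by simp at h1; omega, ?_⟩
    rw [pvPyGet_cons_succ] at h2
    exact h2

theorem pvPyGet_zero (P : List (List Char)) :
    PySem.List.pyGet? P (Int.ofNat 0) = P[0]? := by
  exact_mod_cast PySem.List.pyGet?_natCast P 0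

-- the './' prefix loop drops exactly the leading '.'-segments counted by pvDotSkip
theorem pvLoopDot_segs (ds : List Char) :
    pvSegs (pvLoopDot ds) = (pvSegs ds).drop (pvDotSkip (pvSegs ds) 0) := by
  fun_induction pvLoopDot ds with
  | case1 cs h ih =>
    rcases (PySem.Chars.startswith_iff cs ['.', '/']).mp h with ⟨u, hu⟩
    subst hu
    have hsl : PySem.List.slice (['.', '/'] ++ u) (some 2) none = u := by
      rw [PySem.List.slice_from _ (by norm_num : (0:Int) ≤ 2)]
      rfl
    rw [hsl] at ih ⊢
    have hsegs : pvSegs (['.', '/'] ++ u) = ['.'] :: pvSegs u := by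
      show pvSegs ('.' :: '/' :: u) = _
      simp only [pvSegs, if_neg (by decide : ¬ ('.' = '/'))]
      cases hx : pvSegs u <;> simp [pvConsHead]
    rw [hsegs]
    have hlen : 1 ≤ (pvSegs u).length := by
      cases hx : pvSegs u
      · exact absurd hx (pvSegs_ne_nil u)
      · simp
    rw [pvDotSkip, if_pos ⟨by simp; omega, by rw [pvPyGet_zero]; rfl⟩]
    rw [pvDotSkip_shift]
    rw [List.drop_succ_cons]
    exact ih
  | case2 cs h =>
    rw [pvDotSkip, if_neg ?_]
    · simp
    · intro ⟨h1, h2⟩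
      rw [pvPyGet_zero] at h2
      apply h
      match cs, h1, h2 with
      | [], h1, h2 => simp [pvSegs] at h1
      | c :: t, h1, h2 =>
        by_cases hc : c = '/'
        · subst hc
          simp [pvSegs] at h2
        · simp only [pvSegs, if_neg hc] at h1 h2
          cases hsu : pvSegs t with
          | nil => exact absurd hsu (pvSegs_ne_nil t)
          | cons h0 r =>
            rw [hsu] at h1 h2
            simp [pvConsHead] at h1 h2
            obtain ⟨hcdot, hh0⟩ := h2
            subst hcdot
            cases r with
            | nil => simp at h1
            | cons r0 r' =>
              match t, hsu with
              | [], hsu => simp [pvSegs] at hsu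
              | e :: v, hsu =>
                by_cases he : e = '/'
                · subst he
                  rw [(PySem.Chars.startswith_iff _ _)]
                  exact ⟨v, rfl⟩
                · simp only [pvSegs, if_neg he] at hsu
                  cases hsv : pvSegs v with
                  | nil => exact absurd hsv (pvSegs_ne_nil v)
                  | cons s0 s' =>
                    rw [hsv] at hsu
                    simp [pvConsHead] at hsu
                    rw [← hsu.1] at hh0
                    simp at hh0

-- A's tail (dot-loop, slash-loop, strip) equals B's tail (split, skip, filter, join)
theorem pvCore_eq (ds : List Char) :
    PySem.Chars.stripChars (pvLoopSlash (pvLoopDot ds)) ['/']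
      = PySem.Chars.join ['/']
          ((PySem.List.slice (PySem.Chars.splitOn ds ['/'])
              (some (Int.ofNat (pvDotSkip (PySem.Chars.splitOn ds ['/']) 0))) none).filter
            (fun p => !p.isEmpty)) := by
  rw [pvSplitOn_eq_segs]
  simp only [Int.ofNat_eq_natCast]
  rw [PySem.List.slice_from _ (Int.natCast_nonneg _)]
  rw [pvLoopSlash_spec, pvLoopDot_segs]
  norm_num

-- ===== VERDICT (by name: the statement is the Claim_ definition above) =====
theorem normalize_repo_path_py_spec : Claim_equal_normalize_repo_path_py := by
  intro value hdom
  unfold Spec_normalize_repo_path_py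
  cases value with
  | none => rfl
  | some v =>
    show normalize_repo_path_py (some v) = normalize_repo_path_py_alt (some v)
    unfold normalize_repo_path_py normalize_repo_path_py_alt
    simp only
    have hcond : ∀ (s e l : Bool), (s && e && l) = (l && s && e) := by decide
    rw [hcond]
    rw [pvCore_eq]
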